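-- pv_equiv track=rewrite | github.com/sinterhoo/algorithm | bfs&dfs/21606.py | dfs
-- ===== SOURCE A (Python) =====
-- def dfs(node, n, visited, str1, count):
--     visited[n] = True
--
--     for i in node[n]:
--         if str1[i-1] == '1':
--             count = count +1
--         elif visited[i] == False and str1[i-1] == '0':
--             count = dfs(node, i, visited, str1, count)
--
--     return count
-- ===== SOURCE B (Python) =====
-- def dfs(node, n, visited, str1, count):
--     # Iterative DFS: explicit stack of pending neighbor lists instead of recursion.
--     visited[n] = True
--     stack = [list(node[n])]
--     while stack:
--         frame = stack[-1]
--         if not frame: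
--             stack.pop()
--             continue
--         i = frame.pop(0)
--         if str1[i-1] == '1':
--             count += 1
--         elif not visited[i] and str1[i-1] == '0':
--             visited[i] = True
--             stack.append(list(node[i]))
--     return count
-- ===== Notes on version B (the rewrite author's own statement) =====
-- stated objective: alternative
-- what changed: A's recursive DFS is replaced by an iterative while-loop over an explicit stack of pending neighbor lists (recursion eliminated; children marked visited when pushed), same traversal order and cost.
-- outside the precondition, e.g. on dfs([[-2], [9], []], 0, [False, True], '000', 0): A returns 0, B returns 0
import Mathlib
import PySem

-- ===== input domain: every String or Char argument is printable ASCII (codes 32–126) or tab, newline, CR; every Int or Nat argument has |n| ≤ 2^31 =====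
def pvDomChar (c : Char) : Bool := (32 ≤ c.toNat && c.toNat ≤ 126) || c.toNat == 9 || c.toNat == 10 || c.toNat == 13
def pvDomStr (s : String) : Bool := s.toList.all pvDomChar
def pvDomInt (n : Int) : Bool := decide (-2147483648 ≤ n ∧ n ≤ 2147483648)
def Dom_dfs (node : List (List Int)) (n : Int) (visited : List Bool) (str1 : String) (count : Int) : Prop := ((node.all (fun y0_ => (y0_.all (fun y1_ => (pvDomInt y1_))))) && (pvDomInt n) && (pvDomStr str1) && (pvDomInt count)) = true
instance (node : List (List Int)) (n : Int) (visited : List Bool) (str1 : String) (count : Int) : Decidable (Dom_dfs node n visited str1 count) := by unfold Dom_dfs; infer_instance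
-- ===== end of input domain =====

-- B replaces A's recursive DFS by an iterative loop over an explicit stack of pending
-- neighbor lists (objective: alternative decomposition, same cost). In Python both A and B
-- mutate `visited` in place identically; the equivalence proved here is about the return value.

-- number of unvisited (false) entries; fuel bound for A's recursion, termination measure for B's loop
def pvCf (v : List Bool) : Nat := v.countP (fun b => !b)

-- total size of the pending stack; second component of B's termination measure
def pvSumLen (fs : List (List Int)) : Nat := (fs.map (fun l => l.length + 1)).sum

-- lemma cited by loopB's decreasing_by: marking a false entry true shrinks pvCf
theorem pvCf_pySetD_lt (v : List Bool) (i : Int)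
    (h : PySem.List.pyGet? v i = some false) :
    pvCf (PySem.List.pySetD v i true) < pvCf v := by
  have key : ∀ (w : List Bool) (j : Nat), w[j]? = some false →
      (w.set j true).countP (fun b => !b) < w.countP (fun b => !b) := by
    intro w
    induction w with
    | nil => intro j hj; simp at hj
    | cons b tl ih =>
      intro j hj
      cases j with
      | zero =>
        simp at hj
        subst hj
        simp [List.countP_cons]
      | succ j =>
        simp at hj
        have := ih j hj
        simp only [List.set_cons_succ, List.countP_cons]
        omega
  simp only [PySem.List.pyGet?] at h
  cases hk : PySem.List.pyIdx? v.length i with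
  | none => rw [hk] at h; simp at h
  | some k =>
    rw [hk] at h
    simp only [Option.bind_some] at h
    simp only [PySem.List.pySetD, PySem.List.pySet?, hk, Option.map_some, Option.getD_some]
    exact key v k h

-- ===== PORT A =====
-- dfsA is the recursive Python dfs threading the mutated `visited` through; goA is its
-- `for i in node[n]` loop. The fuel only makes the recursion structural; under Pre_dfs the
-- recursion depth is at most visited.length + 1, so fuel never runs out.
mutual
def dfsA (node : List (List Int)) (str1 : String) (fuel : Nat) (n : Int) (visited : List Bool) (count : Int) : List Bool × Int :=
  match fuel with
  | 0 => (visited, count)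
  | f+1 => goA node str1 f (PySem.List.pyGetD node n []) (PySem.List.pySetD visited n true) count
termination_by (fuel, 0)
def goA (node : List (List Int)) (str1 : String) (fuel : Nat) (ns : List Int) (visited : List Bool) (count : Int) : List Bool × Int :=
  match ns with
  | [] => (visited, count)
  | i :: ns' =>
      if PySem.Str.pyGet? str1 (i-1) = some '1' then
        goA node str1 fuel ns' visited (count+1)
      else if PySem.List.pyGet? visited i = some false ∧ PySem.Str.pyGet? str1 (i-1) = some '0' then
        goA node str1 fuel ns' (dfsA node str1 fuel i visited count).1 (dfsA node str1 fuel i visited count).2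
      else
        goA node str1 fuel ns' visited count
termination_by (fuel, ns.length + 1)
end

def dfs (node : List (List Int)) (n : Int) (visited : List Bool) (str1 : String) (count : Int) : Int :=
  (dfsA node str1 (visited.length + 1) n visited count).2

-- ===== PORT B =====
-- loopB is Source B's while loop: stack of pending neighbor lists, head = top of stack.
def loopB (node : List (List Int)) (str1 : String) (stack : List (List Int)) (visited : List Bool) (count : Int) : List Bool × Int :=
  match stack with
  | [] => (visited, count)
  | [] :: fs => loopB node str1 fs visited count
  | (i :: frame) :: fs =>
      if PySem.Str.pyGet? str1 (i-1) = some '1' then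
        loopB node str1 (frame :: fs) visited (count+1)
      else if h : PySem.List.pyGet? visited i = some false ∧ PySem.Str.pyGet? str1 (i-1) = some '0' then
        loopB node str1 (PySem.List.pyGetD node i [] :: frame :: fs) (PySem.List.pySetD visited i true) count
      else
        loopB node str1 (frame :: fs) visited count
termination_by (pvCf visited, pvSumLen stack)
decreasing_by
  · apply Prod.Lex.right; simp [pvSumLen]
  · apply Prod.Lex.right; simp [pvSumLen]
  · apply Prod.Lex.left; exact pvCf_pySetD_lt _ _ h.1
  · apply Prod.Lex.right; simp [pvSumLen]

def dfs_alt (node : List (List Int)) (n : Int) (visited : List Bool) (str1 : String) (count : Int) : Int :=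
  (loopB node str1 [PySem.List.pyGetD node n []] (PySem.List.pySetD visited n true) count).2

-- ===== PRECONDITION & SPEC =====
-- pvStep/pvReach: the rows the search can reach, statically over-approximated — from row j
-- the search can move to row i (normalized) when str1[i-1] == '0' and visited[i] was False
-- at the start. This is a static graph closure over the input data, not a run of dfs
-- (no count, no evolving visited state).
def pvStep (node : List (List Int)) (visited : List Bool) (str1 : String) (j : Nat) : List Nat :=
  (node.getD j []).filterMap (fun i =>
    if PySem.Str.pyGet? str1 (i-1) = some '0' ∧ PySem.List.pyGet? visited i = some false
    then PySem.List.pyIdx? node.length i else none)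

def pvReach (node : List (List Int)) (visited : List Bool) (str1 : String) (n : Int) : List Nat :=
  (List.range (node.length + 1)).foldl
    (fun acc _ => PySem.Set.union (PySem.Set.ofList acc) (acc.flatMap (pvStep node visited str1)))
    (PySem.List.pyIdx? node.length n).toList

-- Pre_dfs: the start index is in range and every index access in a statically reachable
-- row is in range — exactly the inputs where the Python raises no IndexError. Slightly
-- conservative: when negative-index aliasing between `visited` and `node` makes a
-- statically reachable bad row dynamically unreached, A still returns and is excluded here
-- (B returns the same value there).
def Pre_dfs (node : List (List Int)) (n : Int) (visited : List Bool) (str1 : String) (count : Int) : Prop :=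
  PySem.Raise.InRange node.length n ∧ PySem.Raise.InRange visited.length n ∧
  ∀ j ∈ pvReach node visited str1 n, ∀ i ∈ node.getD j [],
    PySem.Raise.InRange str1.toList.length (i-1) ∧
    (PySem.Str.pyGet? str1 (i-1) = some '1' ∨
      (PySem.Raise.InRange visited.length i ∧
        (PySem.List.pyGet? visited i = some false ∧ PySem.Str.pyGet? str1 (i-1) = some '0' →
          PySem.Raise.InRange node.length i)))
instance (node : List (List Int)) (n : Int) (visited : List Bool) (str1 : String) (count : Int) : Decidable (Pre_dfs node n visited str1 count) := by unfold Pre_dfs; infer_instance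

def pvWitness_dfs : List (List Int) × Int × List Bool × String × Int :=
  ([[2], [], [1]], 0, [false, false, false], "010", 0)

def Spec_dfs (node : List (List Int)) (n : Int) (visited : List Bool) (str1 : String) (count : Int) (out : Int) : Prop := out = dfs_alt node n visited str1 count
instance (node : List (List Int)) (n : Int) (visited : List Bool) (str1 : String) (count : Int) (out : Int) : Decidable (Spec_dfs node n visited str1 count out) := by unfold Spec_dfs; infer_instance

-- ===== CLAIM (what is proved, stated in full; the proofs are below) =====
def Claim_equal_dfs : Prop := ∀ (node : List (List Int)) (n : Int) (visited : List Bool) (str1 : String) (count : Int), Dom_dfs node n visited str1 count → Pre_dfs node n visited str1 count → Spec_dfs node n visited str1 count (dfs node n visited str1 count)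

-- ===== LEMMAS AND PROOFS =====

theorem pvCountP_set_true_le (v : List Bool) (j : Nat) :
    (v.set j true).countP (fun b => !b) ≤ v.countP (fun b => !b) := by
  induction v generalizing j with
  | nil => simp
  | cons b tl ih =>
    cases j with
    | zero => simp only [List.set_cons_zero, List.countP_cons]; cases b <;> simp
    | succ j =>
      simp only [List.set_cons_succ, List.countP_cons]
      have := ih j
      omega

theorem pvCf_pySetD_le (v : List Bool) (i : Int) :
    pvCf (PySem.List.pySetD v i true) ≤ pvCf v := by
  simp only [PySem.List.pySetD, PySem.List.pySet?]
  cases hk : PySem.List.pyIdx? v.length i with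
  | none => simp
  | some k => simpa using pvCountP_set_true_le v k

theorem pvCountP_set_true_lt_len (v : List Bool) (j : Nat) (h : j < v.length) :
    (v.set j true).countP (fun b => !b) < v.length := by
  induction v generalizing j with
  | nil => simp at h
  | cons b tl ih =>
    cases j with
    | zero =>
      simp only [List.set_cons_zero, List.countP_cons, List.length_cons]
      have := List.countP_le_length (p := fun b => !b) (l := tl)
      simp only [Bool.not_true, Bool.false_eq_true, if_false]
      omega
    | succ j =>
      simp only [List.set_cons_succ, List.countP_cons, List.length_cons]
      have := ih j (by simpa using h)
      cases b <;> simp <;> omega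

theorem pvCf_pySetD_lt_len (v : List Bool) (i : Int)
    (h : PySem.Raise.InRange v.length i) :
    pvCf (PySem.List.pySetD v i true) < v.length := by
  obtain ⟨k, hk, hkl⟩ : ∃ k, PySem.List.pyIdx? v.length i = some k ∧ k < v.length := by
    simp only [PySem.Raise.InRange] at h
    simp only [PySem.List.pyIdx?]
    split_ifs with h1 h2 h3
    · exact ⟨i.toNat, rfl, by omega⟩
    · omega
    · exact ⟨v.length - (-i).toNat, rfl, by omega⟩
    · omega
  simp only [PySem.List.pySetD, PySem.List.pySet?, hk, Option.map_some, Option.getD_some]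
  exact pvCountP_set_true_lt_len v k hkl

-- monotonicity: the DFS never unmarks a node
theorem pvMono (node : List (List Int)) (str1 : String) :
    ∀ f : Nat, (∀ (n : Int) (v : List Bool) (c : Int), pvCf (dfsA node str1 f n v c).1 ≤ pvCf v)
      ∧ (∀ (ns : List Int) (v : List Bool) (c : Int), pvCf (goA node str1 f ns v c).1 ≤ pvCf v) := by
  intro f
  induction f with
  | zero =>
    have hd : ∀ (n : Int) (v : List Bool) (c : Int), pvCf (dfsA node str1 0 n v c).1 ≤ pvCf v := by
      intro n v c; simp [dfsA]
    refine ⟨hd, ?_⟩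
    intro ns
    induction ns with
    | nil => intro v c; simp [goA]
    | cons i ns ih =>
      intro v c
      rw [goA]
      split_ifs with h1 h2
      · exact ih v (c+1)
      · exact le_trans (ih _ _) (hd i v c)
      · exact ih v c
  | succ g ihg =>
    have hd : ∀ (n : Int) (v : List Bool) (c : Int), pvCf (dfsA node str1 (g+1) n v c).1 ≤ pvCf v := by
      intro n v c
      rw [dfsA]
      exact le_trans (ihg.2 _ _ _) (pvCf_pySetD_le v n)
    refine ⟨hd, ?_⟩
    intro ns
    induction ns with
    | nil => intro v c; simp [goA]
    | cons i ns ih =>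
      intro v c
      rw [goA]
      split_ifs with h1 h2
      · exact ih v (c+1)
      · exact le_trans (ih _ _) (hd i v c)
      · exact ih v c

-- simulation: running the stack loop on (ns :: fs) first processes ns exactly as A's
-- neighbor loop does, then continues with fs
theorem pvSim (node : List (List Int)) (str1 : String) :
    ∀ (f : Nat) (ns : List Int) (visited : List Bool) (count : Int) (fs : List (List Int)),
      pvCf visited < f →
      loopB node str1 (ns :: fs) visited count =
        loopB node str1 fs (goA node str1 f ns visited count).1 (goA node str1 f ns visited count).2 := by
  intro f
  induction f with
  | zero => intro ns v c fs h; omega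
  | succ g ihg =>
    intro ns
    induction ns with
    | nil => intro v c fs h; simp [loopB, goA]
    | cons i ns ih =>
      intro v c fs h
      by_cases h1 : PySem.List.pyGet? str1.toList (i-1) = some '1'
      · rw [show loopB node str1 ((i :: ns) :: fs) v c = loopB node str1 (ns :: fs) v (c+1) from by
          rw [loopB]; simp [PySem.Str.pyGet?, h1]]
        rw [show goA node str1 (g+1) (i :: ns) v c = goA node str1 (g+1) ns v (c+1) from by
          rw [goA]; simp [PySem.Str.pyGet?, h1]]
        exact ih v (c+1) fs h
      · by_cases h2 : PySem.List.pyGet? v i = some false ∧ PySem.List.pyGet? str1.toList (i-1) = some '0'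
        · have hlt : pvCf (PySem.List.pySetD v i true) < g := by
            have := pvCf_pySetD_lt v i h2.1
            omega
          rw [show loopB node str1 ((i :: ns) :: fs) v c
              = loopB node str1 (PySem.List.pyGetD node i [] :: ns :: fs) (PySem.List.pySetD v i true) c from by
            rw [loopB]; simp [PySem.Str.pyGet?, h1, h2]]
          rw [ihg (PySem.List.pyGetD node i []) (PySem.List.pySetD v i true) c (ns :: fs) hlt]
          have hq : pvCf (goA node str1 g (PySem.List.pyGetD node i []) (PySem.List.pySetD v i true) c).1 < g + 1 := by
            have := (pvMono node str1 g).2 (PySem.List.pyGetD node i []) (PySem.List.pySetD v i true) c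
            omega
          rw [ih _ _ fs hq]
          rw [show goA node str1 (g+1) (i :: ns) v c
              = goA node str1 (g+1) ns (dfsA node str1 (g+1) i v c).1 (dfsA node str1 (g+1) i v c).2 from by
            rw [goA]; simp [PySem.Str.pyGet?, h2]]
          rw [show dfsA node str1 (g+1) i v c
              = goA node str1 g (PySem.List.pyGetD node i []) (PySem.List.pySetD v i true) c from by
            rw [dfsA]]
        · rw [show loopB node str1 ((i :: ns) :: fs) v c = loopB node str1 (ns :: fs) v c from by
            rw [loopB]; simp [PySem.Str.pyGet?, h1, h2]]
          rw [show goA node str1 (g+1) (i :: ns) v c = goA node str1 (g+1) ns v c from by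
            rw [goA]; simp [PySem.Str.pyGet?, h1, h2]]
          exact ih v c fs h

-- ===== VERDICT (by name: the statement is the Claim_ definition above) =====
theorem dfs_spec : Claim_equal_dfs := by
  intro node n visited str1 count hDom hPre
  unfold Spec_dfs dfs dfs_alt
  have hlt : pvCf (PySem.List.pySetD visited n true) < visited.length :=
    pvCf_pySetD_lt_len visited n hPre.2.1
  rw [show dfsA node str1 (visited.length + 1) n visited count
      = goA node str1 visited.length (PySem.List.pyGetD node n []) (PySem.List.pySetD visited n true) count from by
    rw [dfsA]]
  rw [pvSim node str1 visited.length (PySem.List.pyGetD node n []) (PySem.List.pySetD visited n true) count [] hlt]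
  rw [loopB]
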